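-- pv_equiv track=rewrite | github.com/kgodwinb44/Applied_Problem_Solving | # Cat or dog.py | CatOrDog2
-- ===== SOURCE A (Python) =====
-- def CatOrDog2(word):
--     # Write your code here
--     # Dog and Cat as set variables
--     dog_char = set("dogDOG")
--     cat_char = set("catCAT")
--     # Match count
--     cat_count = 0
--     dog_count = 0
--     # Check for matching characters
--     for char in word:
--         # Check for match in cat set
--         if char in cat_char:
--             # Increase cat count by 1
--             cat_count += 1
--         # Check for match in dog set
--         elif char in dog_char:
--             # Increase dog count by 1
--             dog_count += 1
--     # Compare count values
--     if cat_count > dog_count: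
--         return 'CAT'
--     elif dog_count > cat_count:
--         return 'DOG'
--     else:
--         return 'NEITHER'
-- ===== SOURCE B (Python) =====
-- from collections import Counter
--
-- def CatOrDog2(word):
--     counts = Counter(word)
--     cat_count = sum(counts[ch] for ch in "catCAT")
--     dog_count = sum(counts[ch] for ch in "dogDOG")
--     if cat_count > dog_count:
--         return 'CAT'
--     elif dog_count > cat_count:
--         return 'DOG'
--     else:
--         return 'NEITHER'
-- ===== Notes on version B (the rewrite author's own statement) =====
-- stated objective: idiomatic
-- what changed: Replaces the per-character branching scan with a Counter frequency table built once, then sums the table's counts over the two fixed six-letter alphabets instead of testing each word character against the sets.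
import Mathlib
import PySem

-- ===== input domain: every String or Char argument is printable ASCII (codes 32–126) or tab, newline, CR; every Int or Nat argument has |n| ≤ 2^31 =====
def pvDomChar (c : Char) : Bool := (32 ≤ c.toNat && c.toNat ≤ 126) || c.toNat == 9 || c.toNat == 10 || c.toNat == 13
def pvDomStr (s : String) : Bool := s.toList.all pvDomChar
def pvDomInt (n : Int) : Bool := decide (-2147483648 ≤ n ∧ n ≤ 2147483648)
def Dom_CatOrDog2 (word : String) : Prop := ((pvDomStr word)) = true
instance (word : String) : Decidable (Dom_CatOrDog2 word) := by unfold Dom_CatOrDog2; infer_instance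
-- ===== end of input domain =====

-- B replaces A's per-character branching scan with a Counter frequency table summed over the
-- fixed 'catCAT'/'dogDOG' alphabets (objective: idiomatic).

-- ===== PORT A =====
def CatOrDog2 (word : String) : String :=
  let dog_char : PySem.Set Char := PySem.Set.ofList "dogDOG".toList
  let cat_char : PySem.Set Char := PySem.Set.ofList "catCAT".toList
  let counts := word.toList.foldl
    (fun (s : Int × Int) char =>
      if PySem.Set.contains cat_char char then (s.1 + 1, s.2)
      else if PySem.Set.contains dog_char char then (s.1, s.2 + 1)
      else s) (0, 0)
  if counts.1 > counts.2 then "CAT"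
  else if counts.2 > counts.1 then "DOG"
  else "NEITHER"

-- ===== PORT B =====
def CatOrDog2_alt (word : String) : String :=
  let counts := PySem.Dict.counter word.toList
  let cat_count : Int := ("catCAT".toList.map (fun ch => counts.getD ch 0)).sum
  let dog_count : Int := ("dogDOG".toList.map (fun ch => counts.getD ch 0)).sum
  if cat_count > dog_count then "CAT"
  else if dog_count > cat_count then "DOG"
  else "NEITHER"

-- ===== PRECONDITION & SPEC =====
def Spec_CatOrDog2 (word : String) (out : String) : Prop := out = CatOrDog2_alt word
instance (word : String) (out : String) : Decidable (Spec_CatOrDog2 word out) := by unfold Spec_CatOrDog2; infer_instance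

-- ===== CLAIM (what is proved, stated in full; the proofs are below) =====
def Claim_equal_CatOrDog2 : Prop := ∀ (word : String), Dom_CatOrDog2 word → Spec_CatOrDog2 word (CatOrDog2 word)

-- ===== LEMMAS AND PROOFS =====

def catL : List Char := ['c','a','t','C','A','T']
def dogL : List Char := ['d','o','g','D','O','G']

-- sum, over an alphabet, of occurrence counts in l
def cntSum (alpha l : List Char) : Int := (alpha.map (fun ch => ((l.count ch : Int)))).sum

lemma cntSum_nil (alpha : List Char) : cntSum alpha [] = 0 := by
  simp [cntSum]

lemma cntSum_cons (alpha : List Char) (h : alpha.Nodup) (x : Char) (xs : List Char) :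
    cntSum alpha (x :: xs) = cntSum alpha xs + (if x ∈ alpha then 1 else 0) := by
  induction alpha with
  | nil => simp [cntSum]
  | cons a as ih =>
    simp only [List.nodup_cons] at h
    have ih' := ih h.2
    simp only [cntSum, List.map_cons, List.sum_cons] at ih' ⊢
    by_cases hx : x = a
    · subst hx
      simp only [h.1, if_false] at ih'
      simp only [List.count_cons_self, List.mem_cons, true_or, if_true]
      push_cast
      omega
    · have hx' : ¬ a = x := fun hh => hx hh.symm
      have hc : (x :: xs).count a = xs.count a := by
        simp only [List.count_cons]
        simp [hx]
      rw [hc]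
      simp only [List.mem_cons, hx, false_or]
      omega

lemma loopA (l : List Char) : ∀ c d : Int,
    l.foldl (fun (s : Int × Int) char =>
      if PySem.Set.contains (PySem.Set.ofList "catCAT".toList) char then (s.1 + 1, s.2)
      else if PySem.Set.contains (PySem.Set.ofList "dogDOG".toList) char then (s.1, s.2 + 1)
      else s) (c, d) = (c + cntSum catL l, d + cntSum dogL l) := by
  induction l with
  | nil => intro c d; simp [cntSum_nil]
  | cons x xs ih =>
    intro c d
    have hcat := cntSum_cons catL (by decide) x xs
    have hdog := cntSum_cons dogL (by decide) x xs
    have hmc : PySem.Set.contains (PySem.Set.ofList "catCAT".toList) x = decide (x ∈ catL) := by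
      simp [PySem.Set.contains, catL]
    have hmd : PySem.Set.contains (PySem.Set.ofList "dogDOG".toList) x = decide (x ∈ dogL) := by
      simp [PySem.Set.contains, dogL]
    simp only [List.foldl_cons, hmc, hmd]
    by_cases hc : x ∈ catL
    · simp only [hc, decide_true, if_true, ih, hcat, hdog]
      have hnd : x ∉ dogL := by
        intro hd
        simp only [catL, List.mem_cons, List.not_mem_nil, or_false] at hc
        rcases hc with rfl|rfl|rfl|rfl|rfl|rfl <;> simp [dogL] at hd
      simp [hnd]
      ring
    · by_cases hd : x ∈ dogL
      · simp only [hc, hd, decide_true, decide_false, Bool.false_eq_true, if_false, if_true, ih, hcat, hdog]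
        simp
        ring
      · simp only [hc, hd, decide_false, Bool.false_eq_true, if_false, ih, hcat, hdog]
        simp

-- ===== VERDICT (by name: the statement is the Claim_ definition above) =====
theorem CatOrDog2_spec : Claim_equal_CatOrDog2 := by
  intro word _
  unfold Spec_CatOrDog2 CatOrDog2 CatOrDog2_alt
  have hct : "catCAT".toList = catL := by decide
  have hdt : "dogDOG".toList = dogL := by decide
  dsimp only
  rw [loopA]
  simp only [PySem.Dict.getD_counter, hct, hdt, cntSum, zero_add]
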